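-- pv_equiv track=rewrite | github.com/gdainti/obsidian-scripts | reverse_table.py | reverse_markdown_table
-- ===== SOURCE A (Python) =====
-- def reverse_markdown_table(content, keep_header=True):
--     """
--     Reverse the order of rows in markdown tables within the content.
--
--     Args:
--         content: The markdown content to process
--         keep_header: If True, preserves the header row and separator line at the top.
--                     If False, reverses all rows including the header.
--     """
--     lines = content.split('\n')
--     result = []
--     in_table = False
--     table_lines = []
--
--     i = 0
--     while i < len(lines):
--         line = lines[i]
--
--         if '|' in line and line.strip():
--             if not in_table:
--                 in_table = True
--                 table_lines = [line]
--             else: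
--                 table_lines.append(line)
--         else:
--             if in_table:
--                 processed_table = process_table(table_lines, keep_header)
--                 result.extend(processed_table)
--                 in_table = False
--                 table_lines = []
--             result.append(line)
--
--         i += 1
--
--     if in_table and table_lines:
--         processed_table = process_table(table_lines, keep_header)
--         result.extend(processed_table)
--
--     return '\n'.join(result)
--
-- def process_table(table_lines, keep_header=True):
--     """
--     Process a table by reversing its rows.
--
--     Args:
--         table_lines: List of table lines to process
--         keep_header: If True, keeps the header (first row) and separator (second row) in place.
--                     If False, reverses all rows including the header and separator.
--     """
--     if len(table_lines) <= 1:
--         return table_lines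
--
--     if keep_header:
--         if len(table_lines) <= 2:
--             return table_lines
--
--         header = table_lines[0]
--         separator = table_lines[1]
--         data_rows = table_lines[2:]
--
--         data_rows.reverse()
--
--         return [header, separator] + data_rows
--     else:
--         if len(table_lines) <= 2:
--             reversed_lines = table_lines.copy()
--             reversed_lines.reverse()
--             return reversed_lines
--
--         all_rows = table_lines.copy()
--         all_rows.reverse()
--
--         separator_idx = None
--         for i, line in enumerate(all_rows):
--             if '---' in line or ':-:' in line or ':--' in line or '--:' in line:
--                 separator_idx = i
--                 break
--
--         if separator_idx is not None and separator_idx != 1: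
--             separator = all_rows.pop(separator_idx)
--             all_rows.insert(1, separator)
--
--         return all_rows
-- ===== SOURCE B (Python) =====
-- def is_table_line(line):
--     return '|' in line and bool(line.strip())
--
--
-- def is_separator(line):
--     return '---' in line or ':-:' in line or ':--' in line or '--:' in line
--
--
-- def flip_table(block, keep_header):
--     """Pure, slicing-based row rearrangement of one table block (same length)."""
--     if keep_header:
--         if len(block) <= 2:
--             return block
--         return block[:2] + list(reversed(block[2:]))
--     rev = block[::-1]
--     if len(rev) <= 2:
--         return rev
--     sep = next((i for i, l in enumerate(rev) if is_separator(l)), None)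
--     if sep is None or sep == 1:
--         return rev
--     rest = rev[:sep] + rev[sep + 1:]
--     return rest[:1] + [rev[sep]] + rest[1:]
--
--
-- def reverse_markdown_table(content, keep_header=True):
--     """Reverse data rows of markdown tables in content.
--
--     Staged, index-based algorithm: mark each line as table/non-table, locate
--     run boundaries by comparing each position with its neighbour (two
--     comprehensions over the index range), then patch each table run's slice of
--     a copy of the lines with its length-preserving flipped block.
--     """
--     lines = content.split('\n')
--     n = len(lines)
--     keys = [is_table_line(l) for l in lines]
--     starts = [i for i in range(n) if keys[i] and (i == 0 or not keys[i - 1])]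
--     ends = [i + 1 for i in range(n) if keys[i] and (i == n - 1 or not keys[i + 1])]
--     out = list(lines)
--     for s, e in zip(starts, ends):
--         out[s:e] = flip_table(lines[s:e], keep_header)
--     return '\n'.join(out)
-- ===== Notes on version B (the rewrite author's own statement) =====
-- stated objective: alternative
-- what changed: Replaces A's streaming in_table flag/accumulator state machine (with in-place mutating process_table and a post-loop flush) by a staged index-based algorithm: a boolean key list, run boundaries found by two neighbour-comparison comprehensions over the index range, and length-preserving slice patches of a copy of the lines using a pure, slicing-based block transform.
import Mathlib
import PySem

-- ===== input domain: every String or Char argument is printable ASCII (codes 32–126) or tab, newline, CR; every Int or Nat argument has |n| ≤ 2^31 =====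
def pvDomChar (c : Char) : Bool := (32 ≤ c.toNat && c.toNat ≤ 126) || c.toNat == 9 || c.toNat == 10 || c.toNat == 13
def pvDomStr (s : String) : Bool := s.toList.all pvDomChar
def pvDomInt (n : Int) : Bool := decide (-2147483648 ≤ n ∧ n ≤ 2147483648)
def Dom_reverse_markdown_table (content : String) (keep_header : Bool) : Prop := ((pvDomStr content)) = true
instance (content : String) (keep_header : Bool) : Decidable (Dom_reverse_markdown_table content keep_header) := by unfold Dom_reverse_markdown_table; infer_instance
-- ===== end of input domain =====

-- B replaces A's in_table flag / accumulator state machine by a staged index-based algorithm: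
-- boolean keys, run boundaries from neighbour-comparison comprehensions, slice patches (objective: alternative).

-- ===== PORT A =====
-- Python: the separator search loop inside process_table (enumerate + break)
def pvFindSepIdx : List String → Nat → Option Nat
  | [], _ => none
  | l :: ls, i =>
    if PySem.Str.isIn "---" l || PySem.Str.isIn ":-:" l || PySem.Str.isIn ":--" l || PySem.Str.isIn "--:" l
    then some i else pvFindSepIdx ls (i + 1)

def process_table (table_lines : List String) (keep_header : Bool) : List String :=
  if table_lines.length ≤ 1 then table_lines
  else if keep_header then
    if table_lines.length ≤ 2 then table_lines
    else
      match table_lines with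
      | h :: s :: data => [h, s] ++ data.reverse
      | _ => table_lines  -- unreachable: length > 2
  else
    if table_lines.length ≤ 2 then table_lines.reverse
    else
      let all_rows := table_lines.reverse
      match pvFindSepIdx all_rows 0 with
      | none => all_rows
      | some idx =>
        if idx ≠ 1 then
          match PySem.List.pop? all_rows (idx : Int) with
          | some (sep, rest) => PySem.List.insert rest 1 sep
          | none => all_rows  -- unreachable: idx < length
        else all_rows

-- '|' in line and line.strip()
def pvIsTableLine (line : String) : Bool :=
  PySem.Str.isIn "|" line && !((PySem.Str.strip line).toList.isEmpty)

-- A's while loop: state = (result, in_table, table_lines); ends with the post-loop flush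
def pvLoopA (kh : Bool) : List String → List String → Bool → List String → List String
  | [], res, in_t, tbl =>
    if in_t && !tbl.isEmpty then res ++ process_table tbl kh else res
  | l :: ls, res, in_t, tbl =>
    if pvIsTableLine l then
      if !in_t then pvLoopA kh ls res true [l]
      else pvLoopA kh ls res true (tbl ++ [l])
    else
      if in_t then pvLoopA kh ls (res ++ process_table tbl kh ++ [l]) false []
      else pvLoopA kh ls (res ++ [l]) false []

def reverse_markdown_table (content : String) (keep_header : Bool) : String :=
  PySem.Str.join "\n" (pvLoopA keep_header ((PySem.Str.split? content "\n").getD []) [] false [])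

-- ===== PORT B =====
-- '---' in line or ':-:' in line or ':--' in line or '--:' in line
def pvIsSeparator (line : String) : Bool :=
  PySem.Str.isIn "---" line || PySem.Str.isIn ":-:" line || PySem.Str.isIn ":--" line || PySem.Str.isIn "--:" line

-- Source B's flip_table: pure, slicing-based (block[:2] + list(reversed(block[2:])); block[::-1];
-- rev[:sep] + rev[sep+1:]; rest[:1] + [rev[sep]] + rest[1:]); next(...) over enumerate = findIdx?
def pvFlip (block : List String) (keep_header : Bool) : List String :=
  if keep_header then
    if block.length ≤ 2 then block
    else block.take 2 ++ (block.drop 2).reverse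
  else
    let rev := block.reverse
    if rev.length ≤ 2 then rev
    else
      match rev.findIdx? pvIsSeparator with
      | none => rev
      | some sep =>
        if sep == 1 then rev
        else
          let rest := rev.take sep ++ rev.drop (sep + 1)
          rest.take 1 ++ [rev.getD sep ""] ++ rest.drop 1  -- rev[sep]: sep is in range

-- [i for i in range(n) if keys[i] and (i == 0 or not keys[i-1])]  (keys[i] in range → getD exact)
def pvStarts (keys : List Bool) (n : Nat) : List Nat :=
  (List.range n).filter (fun i => keys.getD i false && (decide (i = 0) || !(keys.getD (i - 1) false)))

-- [i + 1 for i in range(n) if keys[i] and (i == n-1 or not keys[i+1])]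
def pvEnds (keys : List Bool) (n : Nat) : List Nat :=
  ((List.range n).filter (fun i => keys.getD i false && (decide (i = n - 1) || !(keys.getD (i + 1) false)))).map (· + 1)

-- out[s:e] = b  (slice assignment; exact for 0 ≤ s ≤ e ≤ len out, which holds for every run)
def pvPatch (out : List String) (s e : Nat) (b : List String) : List String :=
  out.take s ++ b ++ out.drop e

def reverse_markdown_table_alt (content : String) (keep_header : Bool) : String :=
  let lines := (PySem.Str.split? content "\n").getD []
  let n := lines.length
  let keys := lines.map pvIsTableLine
  let starts := pvStarts keys n
  let ends := pvEnds keys n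
  let out := (starts.zip ends).foldl
    (fun out se => pvPatch out se.1 se.2 (pvFlip ((lines.drop se.1).take (se.2 - se.1)) keep_header))
    lines  -- out = list(lines); lines[s:e] for 0 ≤ s ≤ e is drop/take
  PySem.Str.join "\n" out

-- ===== PRECONDITION & SPEC =====
def Spec_reverse_markdown_table (content : String) (keep_header : Bool) (out : String) : Prop := out = reverse_markdown_table_alt content keep_header
instance (content : String) (keep_header : Bool) (out : String) : Decidable (Spec_reverse_markdown_table content keep_header out) := by unfold Spec_reverse_markdown_table; infer_instance

-- ===== CLAIM (what is proved, stated in full; the proofs are below) =====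
def Claim_equal_reverse_markdown_table : Prop := ∀ (content : String) (keep_header : Bool), Dom_reverse_markdown_table content keep_header → Spec_reverse_markdown_table content keep_header (reverse_markdown_table content keep_header)

-- ===== LEMMAS AND PROOFS =====

-- run-recursion reference: process maximal table runs (proof-only intermediate)
def pvGoB (kh : Bool) : List String → List String
  | [] => []
  | l :: ls =>
    if pvIsTableLine l then
      process_table (l :: ls.takeWhile pvIsTableLine) kh ++ pvGoB kh (ls.dropWhile pvIsTableLine)
    else l :: pvGoB kh ls
termination_by ls => ls.length
decreasing_by
  · exact Nat.lt_succ_of_le (List.length_dropWhile_le ..)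
  · simp

-- ---- A's loop equals the run recursion (invariant proofs) ----
theorem pvLoopA_res (kh : Bool) (ls : List String) :
    ∀ (res : List String) (in_t : Bool) (tbl : List String),
      pvLoopA kh ls res in_t tbl = res ++ pvLoopA kh ls [] in_t tbl := by
  induction ls with
  | nil =>
    intro res in_t tbl
    simp only [pvLoopA]
    split <;> simp
  | cons l ls ih =>
    intro res in_t tbl
    simp only [pvLoopA, List.nil_append]
    split_ifs
    · exact ih res true [l]
    · exact ih res true (tbl ++ [l])
    · rw [ih (res ++ process_table tbl kh ++ [l]) false [],
        ih (process_table tbl kh ++ [l]) false []]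
      simp
    · rw [ih (res ++ [l]) false [], ih [l] false []]
      simp

theorem pvLoopA_eq (kh : Bool) (ls : List String) :
    (∀ tbl : List String, tbl ≠ [] →
        pvLoopA kh ls [] true tbl =
          process_table (tbl ++ ls.takeWhile pvIsTableLine) kh ++
            pvGoB kh (ls.dropWhile pvIsTableLine)) ∧
    pvLoopA kh ls [] false [] = pvGoB kh ls := by
  induction ls with
  | nil =>
    constructor
    · intro tbl htbl
      simp [pvLoopA, pvGoB, htbl]
    · simp [pvLoopA, pvGoB]
  | cons l ls ih =>
    constructor
    · intro tbl htbl
      by_cases h : pvIsTableLine l = true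
      · simp only [pvLoopA, h, List.nil_append, if_true, Bool.not_true,
          Bool.false_eq_true, if_false]
        rw [ih.1 (tbl ++ [l]) (by simp)]
        simp [h]
      · simp only [pvLoopA, h, List.nil_append, if_true]
        rw [pvLoopA_res kh ls (process_table tbl kh ++ [l]) false [], ih.2]
        simp [pvGoB, h]
    · by_cases h : pvIsTableLine l = true
      · simp only [pvLoopA, h, List.nil_append, if_true, Bool.not_false]
        rw [ih.1 [l] (by simp)]
        simp [pvGoB, h]
      · simp only [pvLoopA, h, List.nil_append, if_false, Bool.false_eq_true]
        rw [pvLoopA_res kh ls [l] false [], ih.2]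
        simp [pvGoB, h]

-- ---- B's flip equals A's process_table as a value ----
theorem pvFindSepIdx_eq (ls : List String) (i : Nat) :
    pvFindSepIdx ls i = (ls.findIdx? pvIsSeparator).map (· + i) := by
  induction ls generalizing i with
  | nil => simp [pvFindSepIdx]
  | cons l ls ih =>
    have hdef : pvFindSepIdx (l :: ls) i
        = if pvIsSeparator l then some i else pvFindSepIdx ls (i + 1) := rfl
    rw [hdef, List.findIdx?_cons]
    by_cases h : pvIsSeparator l = true
    · simp [h]
    · simp only [h, if_false, Bool.false_eq_true]
      rw [ih (i + 1)]
      cases List.findIdx? pvIsSeparator ls <;> simp <;> omega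

theorem pvFlip_eq (block : List String) (kh : Bool) :
    pvFlip block kh = process_table block kh := by
  cases kh with
  | true =>
    match block with
    | [] => rfl
    | [a] => rfl
    | [a, b] => rfl
    | a :: b :: c :: rest =>
      simp [pvFlip, process_table, Nat.succ_le_iff]
  | false =>
    match block with
    | [] => rfl
    | [a] => rfl
    | [a, b] => rfl
    | a :: b :: c :: rest =>
      have hlen : (a :: b :: c :: rest).length = rest.length + 3 := by simp
      simp only [pvFlip, process_table, hlen, List.length_reverse]
      have h3 : ¬ (rest.length + 3 ≤ 1) := by omega
      have h2 : ¬ (rest.length + 3 ≤ 2) := by omega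
      simp only [h3, h2, if_false]
      rw [pvFindSepIdx_eq _ 0]
      cases h : (a :: b :: c :: rest).reverse.findIdx? pvIsSeparator with
      | none => simp
      | some idx =>
        have hlt : idx < (a :: b :: c :: rest).reverse.length :=
          (List.findIdx?_eq_some_iff_findIdx_eq.mp h).1
        simp only [Option.map_some, Nat.add_zero]
        by_cases h1 : idx = 1
        · simp [h1]
        · have hb : (idx == 1) = false := by simp [h1]
          simp only [hb, ne_eq, h1, not_false_iff, if_true, Bool.false_eq_true, if_false]
          rw [PySem.List.pop?_natCast _ idx hlt]
          have hres : ((a :: b :: c :: rest).reverse.eraseIdx idx).length = rest.length + 2 := by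
            rw [List.length_eraseIdx_of_lt hlt]; simp at hlt ⊢; try omega
          have hone : 1 ≤ ((a :: b :: c :: rest).reverse.eraseIdx idx).length := by omega
          have hins := PySem.List.insert_natCast ((a :: b :: c :: rest).reverse.eraseIdx idx)
            1 ((a :: b :: c :: rest).reverse[idx]) hone
          simp only [Nat.cast_one] at hins
          rw [List.eraseIdx_eq_take_drop_succ] at hins
          show _ = PySem.List.insert
            ((a :: b :: c :: rest).reverse.eraseIdx idx)
            1 ((a :: b :: c :: rest).reverse[idx])
          rw [List.eraseIdx_eq_take_drop_succ, List.getD_eq_getElem _ _ hlt, hins]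
          simp

theorem pvFlip_length (block : List String) (kh : Bool) :
    (pvFlip block kh).length = block.length := by
  unfold pvFlip
  cases kh with
  | true =>
    by_cases h : block.length ≤ 2
    · simp [h]
    · simp only [h, if_false, if_true, List.length_append, List.length_take,
        List.length_reverse, List.length_drop]
      omega
  | false =>
    by_cases h : block.length ≤ 2
    · simp [h]
    · simp only [List.length_reverse, h, if_false, Bool.false_eq_true]
      cases hf : block.reverse.findIdx? pvIsSeparator with
      | none => simp
      | some sep =>
        have hlt : sep < block.reverse.length := (List.findIdx?_eq_some_iff_findIdx_eq.mp hf).1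
        simp only [List.length_reverse] at hlt
        by_cases h1 : sep = 1
        · simp [hf, h1]
        · have h1b : (sep == 1) = false := by simp [h1]
          simp only [hf, h1b, Bool.false_eq_true, if_false, List.length_append,
            List.length_take, List.length_drop, List.length_cons, List.length_tail,
            List.length_nil, List.length_reverse]
          omega

theorem pvGoB_cons (kh : Bool) (l : String) (ls : List String) :
    pvGoB kh (l :: ls)
      = if pvIsTableLine l then
          process_table (l :: ls.takeWhile pvIsTableLine) kh ++ pvGoB kh (ls.dropWhile pvIsTableLine)
        else l :: pvGoB kh ls := by
  rw [pvGoB]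

-- ---- boundary comprehensions: recursion-friendly characterisation ----
def pvStartsGen (keys : List Bool) (prev : Bool) : List Nat :=
  (List.range keys.length).filter
    (fun i => keys.getD i false && (if i = 0 then !prev else !(keys.getD (i - 1) false)))

def pvEndsGen (keys : List Bool) : List Nat :=
  ((List.range keys.length).filter (fun i => keys.getD i false && !(keys.getD (i + 1) false))).map (· + 1)

theorem pvStarts_eq_gen (keys : List Bool) :
    pvStarts keys keys.length = pvStartsGen keys false := by
  unfold pvStarts pvStartsGen
  apply List.filter_congr
  intro i _
  by_cases h : i = 0 <;> simp [h]

theorem pvEnds_eq_gen (keys : List Bool) :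
    pvEnds keys keys.length = pvEndsGen keys := by
  unfold pvEnds pvEndsGen
  apply congrArg (List.map (· + 1))
  apply List.filter_congr
  intro i hi
  rw [List.mem_range] at hi
  by_cases h : i = keys.length - 1
  · have h1 : keys.length ≤ keys.length - 1 + 1 := by omega
    simp [h, List.getElem?_eq_none h1]
  · simp [h]

theorem pvStartsGen_cons (k : Bool) (ks : List Bool) (prev : Bool) :
    pvStartsGen (k :: ks) prev
      = (if k && !prev then [0] else []) ++ (pvStartsGen ks k).map (· + 1) := by
  unfold pvStartsGen
  simp only [List.length_cons, List.range_succ_eq_map, List.filter_cons, List.filter_map]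
  have hp : ∀ i : Nat,
      ((fun i => (k :: ks).getD i false &&
          (if i = 0 then !prev else !((k :: ks).getD (i - 1) false))) ∘ Nat.succ) i
        = (fun i => ks.getD i false && (if i = 0 then !k else !(ks.getD (i - 1) false))) i := by
    intro i
    cases i with
    | zero => simp
    | succ j => simp
  rw [List.filter_congr (fun i _ => hp i)]
  by_cases hk : (k && !prev) = true <;> simp [hk, Nat.succ_eq_add_one]

theorem pvEndsGen_cons (k : Bool) (ks : List Bool) :
    pvEndsGen (k :: ks)
      = (if k && !(ks.getD 0 false) then [1] else []) ++ (pvEndsGen ks).map (· + 1) := by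
  unfold pvEndsGen
  simp only [List.length_cons, List.range_succ_eq_map, List.filter_cons, List.filter_map]
  have hp : ∀ i : Nat,
      ((fun i => (k :: ks).getD i false && !((k :: ks).getD (i + 1) false)) ∘ Nat.succ) i
        = (fun i => ks.getD i false && !(ks.getD (i + 1) false)) i := by
    intro i; simp
  rw [List.filter_congr (fun i _ => hp i)]
  simp only [List.getD_cons_zero, List.getD_cons_succ]
  cases k && !(ks.getD 0 false) <;>
    simp only [if_true, if_false, Bool.false_eq_true, List.map_cons, List.map_map,
      List.nil_append, List.singleton_append]

-- through a run of table lines (hr: the remainder starts with a non-table line, if any)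
theorem pvStartsGen_run (t r : List String)
    (ht : ∀ x ∈ t, pvIsTableLine x = true)
    (hr : ∀ x, r.head? = some x → pvIsTableLine x = false) :
    pvStartsGen ((t ++ r).map pvIsTableLine) true
      = (pvStartsGen (r.map pvIsTableLine) false).map (· + t.length) := by
  induction t with
  | nil =>
    simp only [List.nil_append, List.length_nil]
    have : pvStartsGen (r.map pvIsTableLine) true = pvStartsGen (r.map pvIsTableLine) false := by
      cases r with
      | nil => rfl
      | cons x xs =>
        have hx : pvIsTableLine x = false := hr x rfl
        simp only [List.map_cons, pvStartsGen_cons, hx]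
        simp
    rw [this]
    simp
  | cons x t ih =>
    have hx : pvIsTableLine x = true := ht x (by simp)
    simp only [List.cons_append, List.map_cons, pvStartsGen_cons, hx]
    rw [ih (fun y hy => ht y (by simp [hy]))]
    simp only [Bool.not_true, Bool.and_false, if_neg (by simp : ¬(false = true)), List.nil_append,
      List.map_map, List.length_cons]
    apply List.map_congr_left; intro a _; simp; omega

theorem pvEndsGen_run (l : String) (t r : List String)
    (hl : pvIsTableLine l = true)
    (ht : ∀ x ∈ t, pvIsTableLine x = true)
    (hr : ∀ x, r.head? = some x → pvIsTableLine x = false) :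
    pvEndsGen ((l :: (t ++ r)).map pvIsTableLine)
      = (t.length + 1) :: (pvEndsGen (r.map pvIsTableLine)).map (· + (t.length + 1)) := by
  induction t generalizing l with
  | nil =>
    have hh : ((r.map pvIsTableLine).getD 0 false) = false := by
      cases r with
      | nil => rfl
      | cons x xs => simpa using hr x rfl
    simp only [List.nil_append, List.map_cons, pvEndsGen_cons, hh, hl]
    simp
  | cons x t ih =>
    have hx : pvIsTableLine x = true := ht x (by simp)
    have hh : (((x :: (t ++ r)).map pvIsTableLine).getD 0 false) = true := by simp [hx]
    simp only [List.cons_append, List.map_cons] at *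
    rw [pvEndsGen_cons, hh, hl]
    rw [ih x hx (fun y hy => ht y (by simp [hy]))]
    simp only [Bool.not_true, Bool.and_false, Bool.false_eq_true, if_false, List.nil_append,
      List.map_cons, List.map_map, List.length_cons, List.cons.injEq]
    refine ⟨?_, List.map_congr_left ?_⟩
    · trivial
    · intro a _
      simp only [Function.comp_apply]
      omega

-- ---- the patch fold ----
def pvPF (kh : Bool) (lines : List String) (ps : List (Nat × Nat)) (out : List String) :
    List String :=
  ps.foldl
    (fun out se => pvPatch out se.1 se.2 (pvFlip ((lines.drop se.1).take (se.2 - se.1)) kh))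
    out

theorem pvTake_add {α : Type} (pre l : List α) (i : Nat) :
    (pre ++ l).take (pre.length + i) = pre ++ l.take i := by
  simp [List.take_append]

theorem pvDrop_add {α : Type} (pre l : List α) (i : Nat) :
    (pre ++ l).drop (pre.length + i) = l.drop i := by
  simp [List.drop_append]

theorem pvPF_step (kh : Bool) (L : List String) (q : Nat × Nat) (ps : List (Nat × Nat))
    (out : List String) :
    pvPF kh L (q :: ps) out
      = pvPF kh L ps (pvPatch out q.1 q.2 (pvFlip ((L.drop q.1).take (q.2 - q.1)) kh)) := rfl

theorem pvPF_shift (kh : Bool) (ps : List (Nat × Nat)) :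
    ∀ (pre1 pre2 lines out : List String), pre1.length = pre2.length →
      pvPF kh (pre1 ++ lines) (ps.map (Prod.map (· + pre1.length) (· + pre1.length))) (pre2 ++ out)
        = pre2 ++ pvPF kh lines ps out := by
  induction ps with
  | nil => intro pre1 pre2 lines out _; rfl
  | cons p ps ih =>
    intro pre1 pre2 lines out hlen
    obtain ⟨s, e⟩ := p
    rw [List.map_cons, pvPF_step, pvPF_step]
    have hblk : ((pre1 ++ lines).drop ((Prod.map (· + pre1.length) (· + pre1.length) (s, e)).1)).take
          ((Prod.map (· + pre1.length) (· + pre1.length) (s, e)).2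
            - (Prod.map (· + pre1.length) (· + pre1.length) (s, e)).1)
        = (lines.drop s).take (e - s) := by
      simp only [Prod.map]
      rw [Nat.add_comm s, pvDrop_add]
      congr 1
      omega
    rw [hblk]
    have hpatch : pvPatch (pre2 ++ out) ((Prod.map (· + pre1.length) (· + pre1.length) (s, e)).1)
          ((Prod.map (· + pre1.length) (· + pre1.length) (s, e)).2)
          (pvFlip ((lines.drop s).take (e - s)) kh)
        = pre2 ++ pvPatch out s e (pvFlip ((lines.drop s).take (e - s)) kh) := by
      simp only [Prod.map]
      unfold pvPatch
      rw [Nat.add_comm s, Nat.add_comm e, hlen, pvTake_add, pvDrop_add]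
      simp
    rw [hpatch]
    exact ih pre1 pre2 lines _ hlen

theorem pvMain (kh : Bool) : ∀ (n : Nat) (lines : List String), lines.length ≤ n →
    pvPF kh lines
      ((pvStartsGen (lines.map pvIsTableLine) false).zip (pvEndsGen (lines.map pvIsTableLine)))
      lines = pvGoB kh lines := by
  intro n
  induction n with
  | zero =>
    intro lines h
    have : lines = [] := List.eq_nil_of_length_eq_zero (Nat.le_zero.mp h)
    subst this
    simp [pvStartsGen, pvEndsGen, pvPF, pvGoB]
  | succ n ih =>
    intro lines h
    cases lines with
    | nil => simp [pvStartsGen, pvEndsGen, pvPF, pvGoB]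
    | cons l ls =>
      by_cases hk : pvIsTableLine l = true
      · -- table run case
        have hls : ls.takeWhile pvIsTableLine ++ ls.dropWhile pvIsTableLine = ls :=
          List.takeWhile_append_dropWhile
        have ht : ∀ x ∈ ls.takeWhile pvIsTableLine, pvIsTableLine x = true :=
          fun x hx => List.mem_takeWhile_imp hx
        have hr : ∀ x, (ls.dropWhile pvIsTableLine).head? = some x → pvIsTableLine x = false := by
          intro x hx
          have hh := List.head?_dropWhile_not pvIsTableLine ls
          rw [hx] at hh
          exact hh
        set t := ls.takeWhile pvIsTableLine with hT
        set r := ls.dropWhile pvIsTableLine with hR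
        have hsplit : l :: ls = (l :: t) ++ r := by rw [List.cons_append, hls]
        have hmap : (l :: ls).map pvIsTableLine = (l :: (t ++ r)).map pvIsTableLine := by
          rw [hls]
        have hstarts : pvStartsGen ((l :: ls).map pvIsTableLine) false
            = 0 :: (pvStartsGen (r.map pvIsTableLine) false).map (· + (t.length + 1)) := by
          rw [hmap]
          simp only [List.map_cons, pvStartsGen_cons, hk, Bool.not_false, Bool.and_true]
          rw [pvStartsGen_run t r ht hr]
          simp only [if_true, List.singleton_append, List.map_map, List.cons.injEq, true_and]
          apply List.map_congr_left
          intro a _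
          simp only [Function.comp_apply]
          omega
        have hends : pvEndsGen ((l :: ls).map pvIsTableLine)
            = (t.length + 1) :: (pvEndsGen (r.map pvIsTableLine)).map (· + (t.length + 1)) := by
          rw [hmap]
          exact pvEndsGen_run l t r hk ht hr
        rw [hstarts, hends, List.zip_cons_cons, List.zip_map, pvPF_step]
        have htake : (((l :: ls).drop 0).take (t.length + 1 - 0)) = l :: t := by
          rw [List.drop_zero, Nat.sub_zero, hsplit,
            show t.length + 1 = (l :: t).length by simp, List.take_left]
        have hpatch : pvPatch (l :: ls) 0 (t.length + 1) (pvFlip (l :: t) kh)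
            = pvFlip (l :: t) kh ++ r := by
          unfold pvPatch
          rw [List.take_zero, List.nil_append, hsplit,
            show t.length + 1 = (l :: t).length by simp, List.drop_left]
        rw [show ((0, t.length + 1) : Nat × Nat).1 = 0 from rfl]
        rw [show ((0, t.length + 1) : Nat × Nat).2 = t.length + 1 from rfl]
        rw [htake, hpatch]
        have hshift := pvPF_shift kh
          ((pvStartsGen (r.map pvIsTableLine) false).zip (pvEndsGen (r.map pvIsTableLine)))
          (l :: t) (pvFlip (l :: t) kh) r r (pvFlip_length (l :: t) kh).symm
        simp only [List.length_cons] at hshift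
        rw [hsplit, hshift]
        have hrlen : r.length ≤ n := by
          have h1 : r.length ≤ ls.length := by rw [hR]; exact List.length_dropWhile_le _ _
          simp at h
          omega
        rw [ih r hrlen, pvFlip_eq, ← hsplit]
        rw [pvGoB_cons, if_pos hk, ← hT, ← hR]
      · -- non-table line case
        have hkf : pvIsTableLine l = false := by simpa using hk
        have hstarts : pvStartsGen ((l :: ls).map pvIsTableLine) false
            = (pvStartsGen (ls.map pvIsTableLine) false).map (· + 1) := by
          simp [List.map_cons, pvStartsGen_cons, hkf]
        have hends : pvEndsGen ((l :: ls).map pvIsTableLine)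
            = (pvEndsGen (ls.map pvIsTableLine)).map (· + 1) := by
          simp [List.map_cons, pvEndsGen_cons, hkf]
        rw [hstarts, hends, List.zip_map]
        have := pvPF_shift kh
          ((pvStartsGen (ls.map pvIsTableLine) false).zip (pvEndsGen (ls.map pvIsTableLine)))
          [l] [l] ls ls rfl
        simp only [List.length_cons, List.length_nil, List.singleton_append] at this
        rw [this, ih ls (by simpa using h)]
        rw [pvGoB_cons]
        simp [hkf]

-- ===== VERDICT (by name: the statement is the Claim_ definition above) =====
theorem reverse_markdown_table_spec : Claim_equal_reverse_markdown_table := by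
  intro content keep_header _
  unfold Spec_reverse_markdown_table reverse_markdown_table reverse_markdown_table_alt
  rw [(pvLoopA_eq keep_header ((PySem.Str.split? content "\n").getD [])).2]
  show PySem.Str.join "\n" (pvGoB keep_header ((PySem.Str.split? content "\n").getD []))
    = PySem.Str.join "\n" (pvPF keep_header ((PySem.Str.split? content "\n").getD [])
        ((pvStarts (((PySem.Str.split? content "\n").getD []).map pvIsTableLine)
            ((PySem.Str.split? content "\n").getD []).length).zip
          (pvEnds (((PySem.Str.split? content "\n").getD []).map pvIsTableLine)
            ((PySem.Str.split? content "\n").getD []).length))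
        ((PySem.Str.split? content "\n").getD []))
  apply congrArg (PySem.Str.join "\n")
  set L := (PySem.Str.split? content "\n").getD [] with hL
  have h1 : pvStarts (L.map pvIsTableLine) L.length = pvStartsGen (L.map pvIsTableLine) false := by
    rw [show L.length = (L.map pvIsTableLine).length by simp, pvStarts_eq_gen]
  have h2 : pvEnds (L.map pvIsTableLine) L.length = pvEndsGen (L.map pvIsTableLine) := by
    rw [show L.length = (L.map pvIsTableLine).length by simp, pvEnds_eq_gen]
  rw [h1, h2, pvMain keep_header L.length L (le_refl _)]
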